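-- pv_equiv track=rewrite | github.com/tuyojr/interview_questions | Python/label_filter/lable_filter.py | label_filter
-- ===== SOURCE A (Python) =====
-- def label_filter(data, include_label=None, exclude_label=None):
--     if include_label is None:
--         include_label = []
--     if exclude_label is None:
--         exclude_label = []
--
--     result = []
--
--     for doc in data[1:]:
--         name = doc[0]
--         labels = doc[2].split(',')
--
--         if exclude_label:
--             exclude = any(label.strip() in exclude_label for label in labels)
--             if exclude:
--                 continue
--
--         if include_label:
--             has_all = all(req_label in [label.strip() for label in labels] for req_label in include_label)
--             if has_all:
--                 result.append(name)
--         else: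
--             result.append(name)
--
--     return result
-- ===== SOURCE B (Python) =====
-- def label_filter(data, include_label=None, exclude_label=None):
--     inc = include_label if include_label is not None else []
--     exc = exclude_label if exclude_label is not None else []
--     names = []
--     index = {}
--     for pos, doc in enumerate(data[1:]):
--         names.append(doc[0])
--         for lab in doc[2].split(','):
--             index.setdefault(lab.strip(), set()).add(pos)
--     excluded = set()
--     for e in exc:
--         excluded |= index.get(e, set())
--     if inc:
--         kept = set(range(len(names)))
--         for r in inc:
--             kept &= index.get(r, set())
--     else:
--         kept = set(range(len(names)))
--     return [name for pos, name in enumerate(names) if pos in kept and pos not in excluded]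
-- ===== Notes on version B (the rewrite author's own statement) =====
-- stated objective: alternative
-- what changed: B replaces A's per-document scans of the include/exclude lists by one pass that builds an inverted index from stripped label value to the set of document positions, then computes the excluded positions as a union and the kept positions as an intersection of index entries and emits names by position.
import Mathlib
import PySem

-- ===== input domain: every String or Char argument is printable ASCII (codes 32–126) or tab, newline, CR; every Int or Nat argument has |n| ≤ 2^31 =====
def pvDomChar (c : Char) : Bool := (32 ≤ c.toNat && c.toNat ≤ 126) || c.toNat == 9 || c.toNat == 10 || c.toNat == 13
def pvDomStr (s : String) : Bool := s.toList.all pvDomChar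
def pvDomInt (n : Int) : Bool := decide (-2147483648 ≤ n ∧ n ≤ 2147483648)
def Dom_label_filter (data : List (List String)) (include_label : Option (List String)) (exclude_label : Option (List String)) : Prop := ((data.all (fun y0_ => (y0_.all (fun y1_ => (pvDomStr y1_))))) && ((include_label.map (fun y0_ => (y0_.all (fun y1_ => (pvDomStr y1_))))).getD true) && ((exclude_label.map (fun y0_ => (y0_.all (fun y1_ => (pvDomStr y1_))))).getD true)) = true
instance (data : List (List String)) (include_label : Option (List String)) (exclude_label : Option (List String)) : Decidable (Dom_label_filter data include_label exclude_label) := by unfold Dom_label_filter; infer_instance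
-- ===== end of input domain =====

-- B replaces A's per-document membership scans by one pass building an inverted index
-- (stripped label value -> set of document positions) and set union/intersection (alternative decomposition, not claimed faster).


-- ===== PORT A =====

def label_filter (data : List (List String)) (include_label : Option (List String)) (exclude_label : Option (List String)) : List String :=
  let include_label := include_label.getD []
  let exclude_label := exclude_label.getD []
  (PySem.List.slice data (some 1) none).foldl (fun result doc =>
    match PySem.List.pyGet? doc 0, PySem.List.pyGet? doc 2 with
    | some name, some f2 =>
      let labels := ((PySem.Str.split? f2 ",").getD [])
      if exclude_label ≠ [] ∧
          labels.any (fun label => exclude_label.contains (PySem.Str.strip label)) then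
        result                                             -- continue
      else if include_label ≠ [] then
        if include_label.all (fun req_label =>
            (labels.map (fun label => PySem.Str.strip label)).contains req_label) then
          result ++ [name]
        else result
      else result ++ [name]
    | _, _ => result)                                      -- doc[0] / doc[2] raises: excluded by Pre_
    []

-- ===== PORT B =====
def label_filter_alt (data : List (List String)) (include_label : Option (List String)) (exclude_label : Option (List String)) : List String :=
  let inc := include_label.getD []
  let exc := exclude_label.getD []
  let built := (PySem.List.enumerate (PySem.List.slice data (some 1) none) 0).foldl
    (fun (st : List String × PySem.Dict String (PySem.Set Int)) pd =>
      match PySem.List.pyGet? pd.2 0 with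
      | none => st                                         -- doc[0] raises: excluded by Pre_
      | some name =>
        match PySem.List.pyGet? pd.2 2 with
        | none => st                                       -- doc[2] raises: excluded by Pre_
        | some f2 =>
          (st.1 ++ [name],
           ((PySem.Str.split? f2 ",").getD []).foldl
             (fun d lab => d.modify (PySem.Str.strip lab) PySem.Set.empty
               (fun s => PySem.Set.add s pd.1)) st.2))
    ([], PySem.Dict.empty)
  let names := built.1
  let index := built.2
  let excluded := exc.foldl
    (fun s e => PySem.Set.union s (index.getD e PySem.Set.empty)) PySem.Set.empty
  let kept :=
    if inc ≠ [] then
      inc.foldl (fun s r => PySem.Set.inter s (index.getD r PySem.Set.empty))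
        (PySem.Set.ofList (PySem.List.pyRange 0 names.length 1))
    else PySem.Set.ofList (PySem.List.pyRange 0 names.length 1)
  (PySem.List.enumerate names 0).filterMap (fun pn =>
    if PySem.Set.contains kept pn.1 && !PySem.Set.contains excluded pn.1 then some pn.2 else none)

-- ===== PRECONDITION & SPEC =====
-- Pre_ excludes exactly the inputs where Python A raises IndexError: a document after the
-- header row with fewer than 3 fields (doc[0] or doc[2] out of range).
def Pre_label_filter (data : List (List String)) (include_label : Option (List String)) (exclude_label : Option (List String)) : Prop :=
  ∀ d ∈ data.drop 1, 3 ≤ d.length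
instance (data : List (List String)) (include_label : Option (List String)) (exclude_label : Option (List String)) : Decidable (Pre_label_filter data include_label exclude_label) := by unfold Pre_label_filter; infer_instance
def pvWitness_label_filter : List (List String) × Option (List String) × Option (List String) :=
  ([["name", "id", "labels"], ["doc1", "1", "a, b"], ["doc2", "2", "b,c"]], some ["b"], some ["c"])

def Spec_label_filter (data : List (List String)) (include_label : Option (List String)) (exclude_label : Option (List String)) (out : List String) : Prop := out = label_filter_alt data include_label exclude_label
instance (data : List (List String)) (include_label : Option (List String)) (exclude_label : Option (List String)) (out : List String) : Decidable (Spec_label_filter data include_label exclude_label out) := by unfold Spec_label_filter; infer_instance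

-- ===== CLAIM (what is proved, stated in full; the proofs are below) =====
def Claim_equal_label_filter : Prop := ∀ (data : List (List String)) (include_label : Option (List String)) (exclude_label : Option (List String)), Dom_label_filter data include_label exclude_label → Pre_label_filter data include_label exclude_label → Spec_label_filter data include_label exclude_label (label_filter data include_label exclude_label)

-- ===== LEMMAS AND PROOFS =====

-- s.split(",") for the nonempty literal separator (split? is some there)
def pvSplitComma (s : String) : List String := (PySem.Str.split? s ",").getD []

-- stripped label values of a document (proof-side abbreviation)
def pvStripped (d : List String) : List String :=
  (pvSplitComma (d.getD 2 "")).map PySem.Str.strip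

-- A's per-document decision, in closed form
def pvCond (inc exc : List String) (d : List String) : Bool :=
  !(pvStripped d).any (fun x => exc.contains x) &&
    inc.all (fun r => (pvStripped d).contains r)

-- A's loop body, named for the proofs (definitionally the lambda in the port)
def pvStepA (inc exc : List String) (result doc : List String) : List String :=
  match PySem.List.pyGet? doc 0, PySem.List.pyGet? doc 2 with
  | some name, some f2 =>
    let labels := (PySem.Str.split? f2 ",").getD []
    if exc ≠ [] ∧ labels.any (fun label => exc.contains (PySem.Str.strip label)) then result
    else if inc ≠ [] then
      if inc.all (fun req_label =>
          (labels.map (fun label => PySem.Str.strip label)).contains req_label) then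
        result ++ [name]
      else result
    else result ++ [name]
  | _, _ => result

-- B's build-loop body, named for the proofs (definitionally the lambda in the port)
def pvStepB (st : List String × PySem.Dict String (PySem.Set Int))
    (pd : Int × List String) : List String × PySem.Dict String (PySem.Set Int) :=
  match PySem.List.pyGet? pd.2 0 with
  | none => st
  | some name =>
    match PySem.List.pyGet? pd.2 2 with
    | none => st
    | some f2 =>
      (st.1 ++ [name],
       ((PySem.Str.split? f2 ",").getD []).foldl
         (fun d lab => d.modify (PySem.Str.strip lab) PySem.Set.empty
           (fun s => PySem.Set.add s pd.1)) st.2)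

theorem pvGet_of_len3 (d : List String) (h : 3 ≤ d.length) :
    PySem.List.pyGet? d 0 = some (d.getD 0 "") ∧ PySem.List.pyGet? d 2 = some (d.getD 2 "") := by
  rcases d with _ | ⟨a, _ | ⟨b, _ | ⟨c, t⟩⟩⟩ <;> simp at h ⊢ <;>
    (simp [PySem.List.pyGet?, PySem.List.pyIdx?]; rw [if_pos (by omega)]; simp)

theorem pvStepA_eq (inc exc : List String) (acc d : List String) (h : 3 ≤ d.length) :
    pvStepA inc exc acc d
      = acc ++ (if pvCond inc exc d then some (d.getD 0 "") else none).toList := by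
  obtain ⟨h0, h2⟩ := pvGet_of_len3 d h
  simp only [pvStepA, h0, h2, pvCond, pvStripped, pvSplitComma, List.any_map,
    Function.comp_def]
  by_cases hexc : exc = []
  · subst hexc
    by_cases hinc : inc = [] <;> simp [hinc] <;> split_ifs <;> simp_all
  · by_cases hinc : inc = [] <;> simp [hexc, hinc] <;> split_ifs <;> simp_all <;> tauto

-- A as a filterMap over the documents
theorem pvA_char (docs : List (List String)) (inc exc : List String)
    (h : ∀ d ∈ docs, 3 ≤ d.length) (acc : List String) :
    docs.foldl (pvStepA inc exc) acc
      = acc ++ docs.filterMap (fun d => if pvCond inc exc d then some (d.getD 0 "") else none) := by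
  induction docs generalizing acc with
  | nil => simp
  | cons d rest ih =>
    rw [List.foldl_cons, List.filterMap_cons, pvStepA_eq inc exc acc d (h d (by simp)),
      ih (fun x hx => h x (by simp [hx]))]
    split <;> simp

-- the inner index-building loop over one document's labels
theorem pvInner_mem (labs : List String) (p : Int) (d : PySem.Dict String (PySem.Set Int))
    (l : String) (q : Int) :
    q ∈ (labs.foldl (fun d lab => d.modify (PySem.Str.strip lab) PySem.Set.empty
          (fun s => PySem.Set.add s p)) d).getD l PySem.Set.empty
      ↔ q ∈ d.getD l PySem.Set.empty ∨ (q = p ∧ l ∈ labs.map PySem.Str.strip) := by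
  induction labs generalizing d with
  | nil => simp
  | cons a rest ih =>
    rw [List.foldl_cons, ih, PySem.Dict.getD_modify]
    by_cases hl : l = PySem.Str.strip a
    · subst hl
      simp [PySem.Set.mem_add]
      tauto
    · rw [if_neg hl]
      simp [List.mem_cons, hl]

-- the build loop, names component
theorem pvBuild_names (docs : List (List String)) (h : ∀ d ∈ docs, 3 ≤ d.length)
    (s : Int) (ns : List String) (d0 : PySem.Dict String (PySem.Set Int)) :
    ((PySem.List.enumerate docs s).foldl pvStepB (ns, d0)).1
      = ns ++ docs.map (fun d => d.getD 0 "") := by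
  induction docs generalizing s ns d0 with
  | nil => simp [PySem.List.enumerate_nil]
  | cons d rest ih =>
    obtain ⟨h0, h2⟩ := pvGet_of_len3 d (h d (by simp))
    rw [PySem.List.enumerate_cons, List.foldl_cons]
    have hstep : pvStepB (ns, d0) (s, d) = (ns ++ [d.getD 0 ""],
        ((PySem.Str.split? (d.getD 2 "") ",").getD []).foldl
          (fun dd lab => dd.modify (PySem.Str.strip lab) PySem.Set.empty
            (fun st => PySem.Set.add st s)) d0) := by
      simp [pvStepB, h0, h2]
    rw [hstep, ih (fun x hx => h x (by simp [hx]))]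
    simp

-- the build loop, index membership characterisation
theorem pvBuild_index (docs : List (List String)) (h : ∀ d ∈ docs, 3 ≤ d.length)
    (s : Int) (ns : List String) (d0 : PySem.Dict String (PySem.Set Int))
    (l : String) (q : Int) :
    q ∈ ((PySem.List.enumerate docs s).foldl pvStepB (ns, d0)).2.getD l PySem.Set.empty
      ↔ q ∈ d0.getD l PySem.Set.empty ∨
          ∃ (k : Nat) (_ : k < docs.length), q = s + k ∧ l ∈ pvStripped docs[k] := by
  induction docs generalizing s ns d0 with
  | nil => simp [PySem.List.enumerate_nil]
  | cons d rest ih =>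
    obtain ⟨h0, h2⟩ := pvGet_of_len3 d (h d (by simp))
    rw [PySem.List.enumerate_cons, List.foldl_cons]
    have hstep : pvStepB (ns, d0) (s, d) = (ns ++ [d.getD 0 ""],
        ((PySem.Str.split? (d.getD 2 "") ",").getD []).foldl
          (fun dd lab => dd.modify (PySem.Str.strip lab) PySem.Set.empty
            (fun st => PySem.Set.add st s)) d0) := by
      simp [pvStepB, h0, h2]
    rw [hstep, ih (fun x hx => h x (by simp [hx]))]
    rw [pvInner_mem]
    constructor
    · rintro ((hq | ⟨rfl, hl⟩) | ⟨k, hk, rfl, hl⟩)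
      · exact Or.inl hq
      · exact Or.inr ⟨0, by simp, by simp, by simpa [pvStripped, pvSplitComma] using hl⟩
      · exact Or.inr ⟨k + 1, by simpa using hk, by push_cast; ring, by simpa using hl⟩
    · rintro (hq | ⟨k, hk, rfl, hl⟩)
      · exact Or.inl (Or.inl hq)
      · cases k with
        | zero =>
          exact Or.inl (Or.inr ⟨by simp, by simpa [pvStripped, pvSplitComma] using hl⟩)
        | succ k =>
          refine Or.inr ⟨k, by simpa using hk, by push_cast; ring, by simpa using hl⟩

-- union fold membership
theorem pvUnion_mem (exc : List String) (idx : PySem.Dict String (PySem.Set Int))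
    (acc : PySem.Set Int) (q : Int) :
    q ∈ exc.foldl (fun s e => PySem.Set.union s (idx.getD e PySem.Set.empty)) acc
      ↔ q ∈ acc ∨ ∃ e ∈ exc, q ∈ idx.getD e PySem.Set.empty := by
  induction exc generalizing acc with
  | nil => simp
  | cons e rest ih =>
    rw [List.foldl_cons, ih]
    simp [PySem.Set.mem_union]
    tauto

-- intersection fold membership
theorem pvInter_mem (inc : List String) (idx : PySem.Dict String (PySem.Set Int))
    (acc : PySem.Set Int) (q : Int) :
    q ∈ inc.foldl (fun s r => PySem.Set.inter s (idx.getD r PySem.Set.empty)) acc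
      ↔ q ∈ acc ∧ ∀ r ∈ inc, q ∈ idx.getD r PySem.Set.empty := by
  induction inc generalizing acc with
  | nil => simp
  | cons r rest ih =>
    rw [List.foldl_cons, ih]
    simp [PySem.Set.mem_inter]
    tauto

-- final comprehension over enumerate equals the per-document filterMap
theorem pvFinal_eq (docs : List (List String)) (s : Int) (P : Int → Bool)
    (cond : List String → Bool)
    (h : ∀ (k : Nat) (hk : k < docs.length), P (s + k) = cond docs[k]) :
    (PySem.List.enumerate (docs.map (fun d => d.getD 0 "")) s).filterMap
      (fun pn => if P pn.1 then some pn.2 else none)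
    = docs.filterMap (fun d => if cond d then some (d.getD 0 "") else none) := by
  induction docs generalizing s with
  | nil => simp [PySem.List.enumerate_nil]
  | cons d rest ih =>
    rw [List.map_cons, PySem.List.enumerate_cons, List.filterMap_cons, List.filterMap_cons]
    have hd : P s = cond d := by simpa using h 0 (by simp)
    have hrest : ∀ (k : Nat) (hk : k < rest.length), P (s + 1 + k) = cond rest[k] := by
      intro k hk
      have := h (k + 1) (by simpa using hk)
      push_cast at this ⊢
      rw [show s + 1 + (k : Int) = s + ((k : Int) + 1) by ring]
      simpa using this
    rw [ih (s + 1) hrest, hd]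

-- ===== VERDICT (by name: the statement is the Claim_ definition above) =====
theorem label_filter_spec : Claim_equal_label_filter := by
  intro data io eo hdom hpre
  unfold Spec_label_filter
  have hslice : PySem.List.slice data (some 1) none = data.drop 1 := by simp [pysem]
  have hpre' : ∀ d ∈ data.drop 1, 3 ≤ d.length := hpre
  have hA : label_filter data io eo
      = (PySem.List.slice data (some 1) none).foldl (pvStepA (io.getD []) (eo.getD [])) [] := rfl
  have hB : label_filter_alt data io eo =
      (let inc := io.getD []
       let exc := eo.getD []
       let built := (PySem.List.enumerate (PySem.List.slice data (some 1) none) 0).foldl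
         pvStepB ([], PySem.Dict.empty)
       let names := built.1
       let index := built.2
       let excluded := exc.foldl
         (fun s e => PySem.Set.union s (index.getD e PySem.Set.empty)) PySem.Set.empty
       let kept :=
         if inc ≠ [] then
           inc.foldl (fun s r => PySem.Set.inter s (index.getD r PySem.Set.empty))
             (PySem.Set.ofList (PySem.List.pyRange 0 names.length 1))
         else PySem.Set.ofList (PySem.List.pyRange 0 names.length 1)
       (PySem.List.enumerate names 0).filterMap (fun pn =>
         if PySem.Set.contains kept pn.1 && !PySem.Set.contains excluded pn.1 then some pn.2
         else none)) := rfl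
  rw [hA, hB, hslice]
  simp only []
  set inc := io.getD [] with hinc
  set exc := eo.getD [] with hexc
  set docs := data.drop 1 with hdocs
  rw [pvA_char docs inc exc hpre' []]
  set built := (PySem.List.enumerate docs 0).foldl pvStepB ([], PySem.Dict.empty) with hbuilt
  have hnames : built.1 = docs.map (fun d => d.getD 0 "") :=
    pvBuild_names docs hpre' 0 [] PySem.Dict.empty
  have hidx : ∀ (l : String) (q : Int), q ∈ built.2.getD l PySem.Set.empty ↔
      ∃ (k : Nat) (_ : k < docs.length), q = k ∧ l ∈ pvStripped docs[k] := by
    intro l q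
    have := pvBuild_index docs hpre' 0 [] PySem.Dict.empty l q
    simpa using this
  rw [hnames]
  set excl : PySem.Set Int := exc.foldl
    (fun s e => PySem.Set.union s (built.2.getD e PySem.Set.empty)) PySem.Set.empty with hexcl
  set rng : PySem.Set Int :=
    PySem.Set.ofList (PySem.List.pyRange 0 ((docs.map (fun d => d.getD 0 "")).length : Int) 1)
    with hrng
  set kept : PySem.Set Int :=
    if inc ≠ [] then
      inc.foldl (fun s r => PySem.Set.inter s (built.2.getD r PySem.Set.empty)) rng
    else rng with hkept
  have hP : ∀ (k : Nat) (hk : k < docs.length),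
      (fun q => PySem.Set.contains kept q && !PySem.Set.contains excl q) ((0 : Int) + k)
        = pvCond inc exc docs[k] := by
    intro k hk
    have hgetd : ∀ e, ((k : Int) ∈ built.2.getD e PySem.Set.empty) ↔ e ∈ pvStripped docs[k] := by
      intro e
      rw [hidx]
      constructor
      · rintro ⟨j, hj, hkj, he⟩
        obtain rfl : k = j := by exact_mod_cast hkj
        exact he
      · intro he
        exact ⟨k, hk, rfl, he⟩
    have hrngmem : (k : Int) ∈ rng := by
      rw [hrng]
      simp [PySem.Set.mem_ofList, PySem.List.mem_pyRange_one]
      omega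
    have hkeptmem : ((k : Int) ∈ kept) ↔ ∀ r ∈ inc, r ∈ pvStripped docs[k] := by
      rw [hkept]
      by_cases hi : inc = []
      · simp [hi, hrngmem]
      · rw [if_pos hi]
        exact (pvInter_mem inc built.2 rng k).trans
          ((and_iff_right hrngmem).trans (forall₂_congr fun r _ => hgetd r))
    have hexclmem : ((k : Int) ∈ excl) ↔ ∃ e ∈ exc, e ∈ pvStripped docs[k] := by
      rw [hexcl, pvUnion_mem]
      constructor
      · rintro (h | ⟨e, he, hm⟩)
        · exact absurd h (List.not_mem_nil)
        · exact ⟨e, he, (hgetd e).mp hm⟩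
      · rintro ⟨e, he, hm⟩
        exact Or.inr ⟨e, he, (hgetd e).mpr hm⟩
    have hb : (PySem.Set.contains kept ((0 : Int) + k) && !PySem.Set.contains excl ((0 : Int) + k)) = true
        ↔ ((k : Int) ∈ kept ∧ (k : Int) ∉ excl) := by
      simp
    have hcond : pvCond inc exc docs[k] = true ↔
        (¬ ∃ x ∈ pvStripped docs[k], x ∈ exc) ∧ ∀ r ∈ inc, r ∈ pvStripped docs[k] := by
      simp [pvCond]
    rw [Bool.eq_iff_iff, hb, hkeptmem, hexclmem, hcond]
    constructor
    · rintro ⟨hkp, hne⟩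
      exact ⟨fun ⟨x, hx, hxe⟩ => hne ⟨x, hxe, hx⟩, hkp⟩
    · rintro ⟨hne, hkp⟩
      exact ⟨hkp, fun ⟨e, he, hes⟩ => hne ⟨e, hes, he⟩⟩
  rw [pvFinal_eq docs 0
    (fun q => PySem.Set.contains kept q && !PySem.Set.contains excl q) (pvCond inc exc) hP]
  exact List.nil_append _
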